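-- pv_equiv track=rewrite | github.com/ysuga/qibuild | python/qitoolchain/version.py | explode_version
-- ===== SOURCE A (Python) =====
-- def eat_number(str, index):
--     """ Helper for explode_version """
--     first = index
--     while index < len(str):
--         if not str[index].isdigit():
--             break
--         index += 1
--     return (str[first:index], index)
--
-- def eat_alpha(str, index):
--     """ Helper for explode_version """
--     first = index
--     while index < len(str):
--         if not str[index].isalpha():
--             break
--         index += 1
--     return (str[first:index], index)
--
-- def explode_version(str):
--     """ Explode a version string into a list
--     made of either numbers, or alphabetic chars,
--     or separators
--
--     >>> explode_version('1.2.3')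
--     ['1', '.', '2', '.', '3']
--
--     >>> explode_version('1.2.3-rc1')
--     ['1', '.', '2', '.', '3', '-', 'rc', '1']
--
--     """
--     res = list()
--     index = 0
--     while index < len(str):
--         if str[index].isdigit():
--             (to_append, index) = eat_number(str, index)
--             res.append(to_append)
--         elif str[index].isalpha():
--             (to_append, index) = eat_alpha(str, index)
--             res.append(to_append)
--         else:
--             # append a string with just one char
--             res.append("%s" % str[index])
--             index += 1
--     return res
-- ===== SOURCE B (Python) =====
-- from itertools import groupby
--
-- def explode_version(str):
--     def _cls(c):
--         if c.isdigit():
--             return 0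
--         if c.isalpha():
--             return 1
--         return 2
--     res = []
--     for key, group in groupby(str, _cls):
--         if key == 2:
--             res.extend(group)  # each separator char is its own element
--         else:
--             res.append(''.join(group))
--     return res
-- ===== Notes on version B (the rewrite author's own statement) =====
-- stated objective: idiomatic
-- what changed: Replaces the index-based while loop with eat_number/eat_alpha helpers by a single itertools.groupby pass keyed on a digit/alpha/separator classifier, joining digit/alpha runs and extending separator runs char by char.
import Mathlib
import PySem

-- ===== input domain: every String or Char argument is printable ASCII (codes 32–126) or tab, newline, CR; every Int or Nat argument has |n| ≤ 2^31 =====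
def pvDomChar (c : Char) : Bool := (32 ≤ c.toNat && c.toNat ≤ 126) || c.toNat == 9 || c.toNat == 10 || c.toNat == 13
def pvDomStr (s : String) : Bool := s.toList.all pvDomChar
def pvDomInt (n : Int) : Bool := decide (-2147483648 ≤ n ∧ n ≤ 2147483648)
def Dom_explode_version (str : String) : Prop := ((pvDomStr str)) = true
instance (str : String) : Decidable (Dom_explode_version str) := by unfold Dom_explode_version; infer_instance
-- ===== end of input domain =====

-- B replaces A's index-based while loops (eat_number/eat_alpha) by one groupby pass over
-- digit/alpha/separator runs; objective: idiomatic. Return value only (neither mutates its input).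

-- ===== PORT A =====
-- the while loop shared by eat_number/eat_alpha: advance index while the predicate holds
def pvEatIdx (p : Char → Bool) (cs : List Char) (index : Nat) : Nat :=
  if _ : index < cs.length then
    if p cs[index] then pvEatIdx p cs (index + 1) else index
  else index
termination_by cs.length - index

-- eat_number str index = (str[first:index'], index'); since first ≤ index' ≤ len(str) here,
-- the slice str[first:index'] is exactly (drop first).take (index' - first)
def pvEatNumber (cs : List Char) (index : Nat) : List Char × Nat :=
  let j := pvEatIdx PySem.Chars.isdigit cs index
  (((cs.drop index).take (j - index)), j)

def pvEatAlpha (cs : List Char) (index : Nat) : List Char × Nat :=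
  let j := pvEatIdx PySem.Chars.isalpha cs index
  (((cs.drop index).take (j - index)), j)

-- termination facts for the main loop (cited by decreasing_by below)
theorem pvEatIdx_le (p : Char → Bool) (cs : List Char) (index : Nat) :
    index ≤ pvEatIdx p cs index := by
  unfold pvEatIdx
  split
  · split
    · exact le_trans (Nat.le_succ _) (pvEatIdx_le p cs (index + 1))
    · exact le_refl _
  · exact le_refl _
termination_by cs.length - index

theorem pvEatIdx_lt (p : Char → Bool) (cs : List Char) (index : Nat)
    (h : index < cs.length) (hp : p cs[index] = true) : index < pvEatIdx p cs index := by
  unfold pvEatIdx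
  simp only [h, hp, dif_pos, if_pos]
  exact lt_of_lt_of_le (Nat.lt_succ_self _) (pvEatIdx_le p cs (index + 1))

-- the main while loop of explode_version
def pvExplLoop (cs : List Char) (index : Nat) : List String :=
  if h : index < cs.length then
    if hd : PySem.Chars.isdigit cs[index] then
      String.mk (pvEatNumber cs index).1 :: pvExplLoop cs (pvEatNumber cs index).2
    else if ha : PySem.Chars.isalpha cs[index] then
      String.mk (pvEatAlpha cs index).1 :: pvExplLoop cs (pvEatAlpha cs index).2
    else
      String.mk [cs[index]] :: pvExplLoop cs (index + 1)
  else []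
termination_by cs.length - index
decreasing_by
  · have := pvEatIdx_lt PySem.Chars.isdigit cs index h hd
    simp only [pvEatNumber]; omega
  · have := pvEatIdx_lt PySem.Chars.isalpha cs index h ha
    simp only [pvEatAlpha]; omega
  · omega

def explode_version (str : String) : List String := pvExplLoop str.toList 0

-- ===== PORT B =====
-- the classifier _cls: 0 = digit, 1 = alpha, 2 = separator
def pvCls (c : Char) : Nat :=
  if PySem.Chars.isdigit c then 0 else if PySem.Chars.isalpha c then 1 else 2

-- groupby(str, _cls): peel one maximal run of equal key at a time;
-- key 2 extends char by char, keys 0/1 join the run into one token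
def pvGroupLoop : List Char → List String
  | [] => []
  | c :: cs =>
    let g := cs.takeWhile (fun d => pvCls d == pvCls c)
    let rest := cs.dropWhile (fun d => pvCls d == pvCls c)
    if pvCls c == 2 then
      (c :: g).map (fun d => String.mk [d]) ++ pvGroupLoop rest
    else
      String.mk (c :: g) :: pvGroupLoop rest
termination_by cs => cs.length
decreasing_by all_goals simpa using Nat.lt_succ_of_le (List.length_dropWhile_le _ _)

def explode_version_alt (str : String) : List String := pvGroupLoop str.toList

-- ===== PRECONDITION & SPEC =====
def Spec_explode_version (str : String) (out : List String) : Prop := out = explode_version_alt str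
instance (str : String) (out : List String) : Decidable (Spec_explode_version str out) := by unfold Spec_explode_version; infer_instance

-- ===== CLAIM (what is proved, stated in full; the proofs are below) =====
def Claim_equal_explode_version : Prop := ∀ (str : String), Dom_explode_version str → Spec_explode_version str (explode_version str)

-- ===== LEMMAS AND PROOFS =====

-- no char is both a digit and a letter
theorem pv_digit_not_alpha (c : Char) (h : PySem.Chars.isdigit c = true) :
    PySem.Chars.isalpha c = false := by
  simp [PySem.Chars.isdigit, Char.le_def] at h
  simp [PySem.Chars.isalpha, PySem.Chars.isupper, PySem.Chars.islower, Char.le_def] at h ⊢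
  simp [UInt32.le_iff_toNat_le, UInt32.lt_iff_toNat_lt] at h ⊢
  omega

theorem pvCls_eq_zero (c : Char) : (pvCls c == 0) = PySem.Chars.isdigit c := by
  unfold pvCls; split_ifs <;> simp_all

theorem pvCls_eq_one (c : Char) : (pvCls c == 1) = PySem.Chars.isalpha c := by
  unfold pvCls
  split_ifs with hd ha
  · simp [pv_digit_not_alpha c hd]
  · simp [ha]
  · simp [ha]

-- pvEatIdx characterised by takeWhile/dropWhile on the suffix
theorem pvEatIdx_spec (p : Char → Bool) (cs : List Char) (index : Nat) :
    pvEatIdx p cs index = index + ((cs.drop index).takeWhile p).length ∧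
    cs.drop (pvEatIdx p cs index) = (cs.drop index).dropWhile p := by
  unfold pvEatIdx
  split
  · rename_i h
    have hdrop : cs.drop index = cs[index] :: cs.drop (index + 1) :=
      List.drop_eq_getElem_cons h
    split
    · rename_i hp
      obtain ⟨ih1, ih2⟩ := pvEatIdx_spec p cs (index + 1)
      refine ⟨?_, ?_⟩
      · rw [ih1, hdrop, List.takeWhile_cons_of_pos hp]
        simp; omega
      · rw [ih2, hdrop, List.dropWhile_cons_of_pos hp]
    · rename_i hp
      refine ⟨?_, ?_⟩
      · rw [hdrop, List.takeWhile_cons_of_neg (by simpa using hp)]; simp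
      · rw [hdrop, List.dropWhile_cons_of_neg (by simpa using hp)]
  · rename_i h
    have : cs.drop index = [] := List.drop_eq_nil_of_le (by omega)
    simp [this]
termination_by cs.length - index

-- a separator head peels off as its own singleton token
theorem pvGroupLoop_sep (c : Char) (rest : List Char) (hc : pvCls c = 2) :
    pvGroupLoop (c :: rest) = String.mk [c] :: pvGroupLoop rest := by
  rw [pvGroupLoop]
  simp only [hc]
  cases rest with
  | nil => simp [pvGroupLoop]
  | cons d rest2 =>
    by_cases hd : pvCls d = 2
    · rw [List.takeWhile_cons_of_pos (by simp [hd]),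
          List.dropWhile_cons_of_pos (by simp [hd])]
      simp only [List.map_cons, List.cons_append, beq_self_eq_true, if_pos]
      congr 1
      rw [pvGroupLoop]
      simp [hd]
    · rw [List.takeWhile_cons_of_neg (by simp [hd]),
          List.dropWhile_cons_of_neg (by simp [hd])]
      simp

-- a digit/alpha head peels off the whole maximal run as one token
theorem pvGroupLoop_run (p : Char → Bool) (k : Nat) (c : Char) (rest : List Char)
    (hck : pvCls c = k) (hk2 : k ≠ 2)
    (hp : ∀ d, (pvCls d == k) = p d) :
    pvGroupLoop (c :: rest) =
      String.mk (c :: rest.takeWhile p) :: pvGroupLoop (rest.dropWhile p) := by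
  rw [pvGroupLoop]
  have hfun : (fun d => pvCls d == pvCls c) = p := by
    funext d; rw [hck]; exact hp d
  rw [hfun]
  simp only [hck]
  rw [if_neg (by simpa using hk2)]

-- main loop invariant: A's loop from index equals B's groupby on the suffix
theorem pvExplLoop_eq (cs : List Char) (index : Nat) :
    pvExplLoop cs index = pvGroupLoop (cs.drop index) := by
  rw [pvExplLoop]
  split
  · rename_i h
    have hdrop : cs.drop index = cs[index] :: cs.drop (index + 1) :=
      List.drop_eq_getElem_cons h
    by_cases hd : PySem.Chars.isdigit cs[index] = true
    · rw [dif_pos hd]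
      obtain ⟨hj, hdropj⟩ := pvEatIdx_spec PySem.Chars.isdigit cs index
      have htake : (pvEatNumber cs index).1 = (cs.drop index).takeWhile PySem.Chars.isdigit := by
        simp only [pvEatNumber]
        rw [hj, Nat.add_sub_cancel_left]
        exact (List.prefix_iff_eq_take.mp (List.takeWhile_prefix _)).symm
      have hrec : pvExplLoop cs (pvEatNumber cs index).2
          = pvGroupLoop ((cs.drop (index + 1)).dropWhile PySem.Chars.isdigit) := by
        rw [pvExplLoop_eq cs (pvEatNumber cs index).2]
        simp only [pvEatNumber]
        rw [hdropj, hdrop, List.dropWhile_cons_of_pos hd]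
      rw [htake, hrec, hdrop, List.takeWhile_cons_of_pos hd]
      exact (pvGroupLoop_run PySem.Chars.isdigit 0 cs[index] (cs.drop (index + 1))
        (by simp [pvCls, hd]) (by decide) pvCls_eq_zero).symm
    · rw [dif_neg hd]
      by_cases ha : PySem.Chars.isalpha cs[index] = true
      · rw [dif_pos ha]
        obtain ⟨hj, hdropj⟩ := pvEatIdx_spec PySem.Chars.isalpha cs index
        have htake : (pvEatAlpha cs index).1 = (cs.drop index).takeWhile PySem.Chars.isalpha := by
          simp only [pvEatAlpha]
          rw [hj, Nat.add_sub_cancel_left]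
          exact (List.prefix_iff_eq_take.mp (List.takeWhile_prefix _)).symm
        have hrec : pvExplLoop cs (pvEatAlpha cs index).2
            = pvGroupLoop ((cs.drop (index + 1)).dropWhile PySem.Chars.isalpha) := by
          have := pvExplLoop_eq cs (pvEatAlpha cs index).2
          rw [this]
          simp only [pvEatAlpha]
          rw [hdropj, hdrop, List.dropWhile_cons_of_pos ha]
        rw [htake, hrec, hdrop, List.takeWhile_cons_of_pos ha]
        exact (pvGroupLoop_run PySem.Chars.isalpha 1 cs[index] (cs.drop (index + 1))
          (by simp [pvCls, hd, ha]) (by decide) pvCls_eq_one).symm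
      · rw [dif_neg ha]
        have ih := pvExplLoop_eq cs (index + 1)
        rw [ih, hdrop,
          pvGroupLoop_sep cs[index] (cs.drop (index + 1)) (by simp [pvCls, hd, ha])]
  · rename_i h
    have : cs.drop index = [] := List.drop_eq_nil_of_le (by omega)
    simp [this, pvGroupLoop]
termination_by cs.length - index
decreasing_by
  · have := pvEatIdx_lt PySem.Chars.isdigit cs index ‹index < cs.length› hd
    simp only [pvEatNumber]; omega
  · have := pvEatIdx_lt PySem.Chars.isalpha cs index ‹index < cs.length› ha
    simp only [pvEatAlpha]; omega
  · omega

-- ===== VERDICT (by name: the statement is the Claim_ definition above) =====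
theorem explode_version_spec : Claim_equal_explode_version := by
  intro str _
  unfold Spec_explode_version explode_version explode_version_alt
  simpa using pvExplLoop_eq str.toList 0
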